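-- pv_equiv track=rewrite | github.com/nathanzhu144/practices | OA_2019_Goldman_matrix_game.py | matrix_game_old
-- ===== SOURCE A (Python) =====
-- def matrix_game_old(moves):
--     # Banned == 0 if not banned, 1 if banned.
--     banned = [0] * len(moves[0])
--     real_moves = [0] * len(moves[0])
--
--     for col in range(len(moves[0])):
--         temp = float('-inf')
--         for row in range(len(moves)):
--             temp = max(moves[row][col], temp)
--         real_moves[col] = temp
--
--     # player is which player is currently moving.
--     def helper(banned, count):
--         #key = tuple(banned)
--         #if key in mem: return mem[key]
--         ret = float("-inf")
--         if count == len(banned): return 0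
--
--         maxcol, maxnum = -1, float('-inf')
--         for col in range(len(moves[0])):
--             # not banned
--             if banned[col] == 0 and real_moves[col] > maxnum:
--                 maxcol = col
--                 maxnum = real_moves[col]
--
--         banned[maxcol] = 1
--         ret = max(ret, maxnum - helper(banned, count + 1))
--         return ret
--
--     return helper(banned, 0)
-- ===== SOURCE B (Python) =====
-- def matrix_game_old(moves):
--     # Column maxima via builtin max over each column, then an iterative
--     # select-max / remove loop with an alternating sign instead of A's recursion.
--     maxima = [max(row[c] for row in moves) for c in range(len(moves[0]))]
--     total, sign = 0, 1
--     remaining = maxima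
--     while remaining:
--         best = remaining[0]
--         for v in remaining[1:]:
--             if v > best:
--                 best = v
--         total += sign * best
--         sign = -sign
--         remaining.remove(best)
--     return total
-- ===== Notes on version B (the rewrite author's own statement) =====
-- stated objective: alternative
-- what changed: Replaces A's recursive helper with an iterative select-max/remove loop carrying a running total and an alternating sign, and computes each column maximum with builtin max over the column instead of A's hand-rolled -inf running-max loop.
-- outside the precondition, e.g. on matrix_game_old([]): A raises IndexError, B raises IndexError
import Mathlib
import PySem

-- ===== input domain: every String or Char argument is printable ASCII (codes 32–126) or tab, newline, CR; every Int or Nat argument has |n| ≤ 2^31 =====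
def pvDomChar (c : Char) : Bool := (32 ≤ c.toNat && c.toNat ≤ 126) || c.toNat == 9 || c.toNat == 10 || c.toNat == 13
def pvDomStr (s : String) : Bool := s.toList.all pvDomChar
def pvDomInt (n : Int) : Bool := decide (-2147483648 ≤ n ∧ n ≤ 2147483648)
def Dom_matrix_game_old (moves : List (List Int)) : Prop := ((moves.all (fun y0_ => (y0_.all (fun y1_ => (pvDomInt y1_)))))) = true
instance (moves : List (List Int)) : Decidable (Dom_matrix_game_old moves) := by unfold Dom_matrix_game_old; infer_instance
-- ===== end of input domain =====

-- B replaces A's recursive helper by an iterative select-max/remove loop with an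
-- alternating sign, and takes each column maximum with builtin max instead of A's
-- hand-rolled -inf running-max loop (objective: alternative decomposition).

-- ===== PORT A =====

-- max(moves[row][col], temp) where temp is None for float('-inf')
def pvPyMax (x : Int) (t : Option Int) : Option Int :=
  some (match t with | none => x | some y => if y > x then y else x)

-- v beats the running maximum mn (None = float('-inf'))
def pvGt (v : Int) (t : Option Int) : Bool :=
  match t with | none => true | some y => decide (v > y)

-- the inner 'for col in range(...)' scan of helper, over zip(real_moves, banned)
-- carrying the column index i and the state (maxcol, maxnum)
def pvScanA : List (Int × Int) → Int → Int × Option Int → Int × Option Int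
  | [], _, s => s
  | (v, b) :: rest, i, (mc, mn) =>
      pvScanA rest (i + 1) (if b = 0 ∧ pvGt v mn then (i, some v) else (mc, mn))

-- banned[maxcol] = 1 (Python index assignment, negative index from the end)
def pvSetBanned (banned : List Int) (mc : Int) : List Int :=
  if mc < 0 then banned.set (banned.length + mc).toNat 1 else banned.set mc.toNat 1

-- helper(banned, count); fuel = len(banned) - count
def pvHelperA (realMoves : List Int) : Nat → List Int → Int
  | 0, _ => 0
  | f + 1, banned =>
      let s := pvScanA (realMoves.zip banned) 0 (-1, none)
      s.2.getD 0 - pvHelperA realMoves f (pvSetBanned banned s.1)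

def matrix_game_old (moves : List (List Int)) : Int :=
  let ncols := (moves.headD []).length
  let realMoves := (List.range ncols).map (fun c =>
    (moves.foldl (fun t row => pvPyMax (row.getD c 0) t) none).getD 0)
  pvHelperA realMoves ncols (List.replicate ncols 0)

-- ===== PORT B =====

-- best = remaining[0]; for v in remaining[1:]: if v > best: best = v
def pvBestScan (h : Int) (t : List Int) : Int :=
  t.foldl (fun b v => if v > b then v else b) h

-- the while loop; fuel = len(remaining) (each pass removes one element)
def pvSelB : Nat → List Int → Int → Int → Int
  | 0, _, total, _ => total
  | f + 1, rem, total, sign =>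
      match rem with
      | [] => total
      | h :: t =>
          let best := pvBestScan h t
          pvSelB f ((PySem.List.remove? rem best).getD rem) (total + sign * best) (-sign)

def matrix_game_old_alt (moves : List (List Int)) : Int :=
  let maxima := (List.range (moves.headD []).length).map (fun c =>
    (PySem.List.max? (moves.map (fun row => row.getD c 0)) (fun x => x)).getD 0)
  pvSelB maxima.length maxima 0 1

-- ===== PRECONDITION & SPEC =====
-- Pre_ excludes exactly the inputs where A raises: moves = [] (moves[0] IndexError)
-- and matrices with a row shorter than row 0 (moves[row][col] IndexError).
def Pre_matrix_game_old (moves : List (List Int)) : Prop :=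
  moves ≠ [] ∧ ∀ r ∈ moves, (moves.headD []).length ≤ r.length
instance (moves : List (List Int)) : Decidable (Pre_matrix_game_old moves) := by
  unfold Pre_matrix_game_old; infer_instance

def pvWitness_matrix_game_old : List (List Int) := [[1, 3, 2], [4, 0, 5]]

def Spec_matrix_game_old (moves : List (List Int)) (out : Int) : Prop := out = matrix_game_old_alt moves
instance (moves : List (List Int)) (out : Int) : Decidable (Spec_matrix_game_old moves out) := by unfold Spec_matrix_game_old; infer_instance

-- ===== CLAIM (what is proved, stated in full; the proofs are below) =====
def Claim_equal_matrix_game_old : Prop := ∀ (moves : List (List Int)), Dom_matrix_game_old moves → Pre_matrix_game_old moves → Spec_matrix_game_old moves (matrix_game_old moves)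

-- ===== LEMMAS AND PROOFS =====

def pvFrem (zs : List (Int × Int)) : List Int :=
  zs.filterMap (fun p => if p.2 = 0 then some p.1 else none)
def pvOmax (mn : Option Int) (l : List Int) : Option Int :=
  l.foldl (fun t v => if pvGt v t then some v else t) mn
theorem pvScanA_snd (zs : List (Int × Int)) : ∀ (i mc : Int) (mn : Option Int),
    (pvScanA zs i (mc, mn)).2 = pvOmax mn (pvFrem zs) := by
  induction zs with
  | nil => intro i mc mn; rfl
  | cons p rest ih =>
    obtain ⟨v, b⟩ := p
    intro i mc mn
    by_cases hb : b = 0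
    · by_cases hg : pvGt v mn = true
      · simp [pvScanA, pvFrem, pvOmax, hb, hg, ih]
      · simp [pvScanA, pvFrem, pvOmax, hb, hg, ih]
    · simp [pvScanA, pvFrem, pvOmax, hb, ih]

theorem pvGt_trans {m v : Int} {mn : Option Int} (h1 : pvGt m (some v) = true)
    (h2 : pvGt v mn = true) : pvGt m mn = true := by
  cases mn
  · simp_all [pvGt]
  · simp_all [pvGt]; omega

theorem pvOmax_cases (l : List Int) : ∀ (mn : Option Int),
    pvOmax mn l = mn ∨ ∃ m, pvOmax mn l = some m ∧ pvGt m mn = true := by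
  induction l with
  | nil => intro mn; left; rfl
  | cons v t ih =>
    intro mn
    by_cases hg : pvGt v mn = true
    · right
      rcases ih (some v) with h | ⟨m, hm, hgt⟩
      · exact ⟨v, by simp [pvOmax, hg] at *; simpa [pvOmax, hg] using h, hg⟩
      · exact ⟨m, by simpa [pvOmax, hg] using hm, pvGt_trans hgt hg⟩
    · simpa [pvOmax, hg] using ih mn

theorem pvGt_ne {m : Int} {mn : Option Int} (h : pvGt m mn = true) : some m ≠ mn := by
  cases mn
  · simp_all [pvGt]
  · simp_all [pvGt]; omega

theorem pvOmax_some_cons (t : List Int) : ∀ m0 : Int,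
    pvOmax (some m0) t = some (pvBestScan m0 t) := by
  induction t with
  | nil => intro m0; rfl
  | cons v t ih =>
    intro m0
    by_cases h : v > m0 <;> simp [pvOmax, pvBestScan, pvGt, h] at * <;> simpa [pvOmax, pvBestScan] using ih _

theorem pvBestScan_mem (h : Int) (t : List Int) : pvBestScan h t ∈ h :: t := by
  have := PySem.List.foldl_max_mem t h
  have e : pvBestScan h t = t.foldl max h := by
    unfold pvBestScan
    congr 1; funext b v; by_cases hvb : v > b <;> simp [hvb] <;> omega
  rcases this with h1 | h1 <;> simp [e, h1]
theorem pvScanA_shift (zs : List (Int × Int)) : ∀ (mn : Option Int) (i j mc mc' : Int),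
    (pvScanA zs i (mc, mn)).2 = (pvScanA zs j (mc', mn)).2 ∧
    ((pvScanA zs i (mc, mn)).2 ≠ mn →
      0 ≤ (pvScanA zs i (mc, mn)).1 - i ∧
      (pvScanA zs i (mc, mn)).1 - i = (pvScanA zs j (mc', mn)).1 - j) ∧
    ((pvScanA zs i (mc, mn)).2 = mn → (pvScanA zs i (mc, mn)).1 = mc) := by
  induction zs with
  | nil => intro mn i j mc mc'; exact ⟨rfl, fun h => absurd rfl h, fun _ => rfl⟩
  | cons p rest ih =>
    obtain ⟨v, b⟩ := p
    intro mn i j mc mc'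
    by_cases hc : b = 0 ∧ pvGt v mn = true
    · -- update: state becomes (i, some v) / (j, some v)
      simp only [pvScanA, if_pos hc]
      obtain ⟨e2, eupd, enoupd⟩ := ih (some v) (i+1) (j+1) i j
      refine ⟨e2, ?_, ?_⟩
      · intro _
        -- case on whether the rest updates again
        by_cases hu : (pvScanA rest (i+1) (i, some v)).2 = some v
        · have h1 := enoupd hu
          have h2 := (ih (some v) (j+1) (i+1) j i).2.2 (by rw [(ih (some v) (j+1) (i+1) j i).1]; exact hu)
          rw [h1, h2]; omega
        · obtain ⟨hge, heq⟩ := eupd hu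
          omega
      · intro hmn
        -- final = old mn: impossible-to-land-back: final is some v or beats some v
        exfalso
        rcases pvOmax_cases (pvFrem rest) (some v) with h | ⟨m, hm, hgt⟩
        · rw [pvScanA_snd, h] at hmn
          exact pvGt_ne hc.2 hmn
        · rw [pvScanA_snd, hm] at hmn
          exact pvGt_ne (pvGt_trans hgt hc.2) hmn
    · simp only [pvScanA, if_neg hc]
      obtain ⟨e2, eupd, enoupd⟩ := ih mn (i+1) (j+1) mc mc'
      refine ⟨e2, ?_, enoupd⟩
      intro h
      obtain ⟨hge, heq⟩ := eupd h
      omega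
theorem pvScanA_step : ∀ (real banned : List Int) (mn : Option Int) (mc0 : Int),
    banned.length = real.length →
    (∃ m, pvOmax mn (pvFrem (real.zip banned)) = some m ∧ pvGt m mn = true) →
    ∃ m, (pvScanA (real.zip banned) 0 (mc0, mn)).2 = some m ∧
      0 ≤ (pvScanA (real.zip banned) 0 (mc0, mn)).1 ∧
      (pvScanA (real.zip banned) 0 (mc0, mn)).1.toNat < banned.length ∧
      pvFrem (real.zip (banned.set (pvScanA (real.zip banned) 0 (mc0, mn)).1.toNat 1)) =
        (pvFrem (real.zip banned)).erase m := by
  intro real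
  induction real with
  | nil =>
    intro banned mn mc0 hlen hbeat
    obtain ⟨m, hm, hgt⟩ := hbeat
    simp [pvFrem, pvOmax] at hm
    exact absurd hm.symm (pvGt_ne hgt)
  | cons v real' ih =>
    intro banned mn mc0 hlen hbeat
    cases banned with
    | nil => simp at hlen
    | cons b banned' =>
      have hlen' : banned'.length = real'.length := by simpa using hlen
      by_cases hc : b = 0 ∧ pvGt v mn = true
      · have hb0 : b = 0 := hc.1
        simp only [List.zip_cons_cons, pvScanA, if_pos hc, zero_add]
        rcases pvOmax_cases (pvFrem (real'.zip banned')) (some v) with hkeep | ⟨m, hm, hgt⟩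
        · -- nothing after beats v: scan result is (0, some v)
          have h2 : (pvScanA (real'.zip banned') 1 (0, some v)).2 = some v := by
            rw [pvScanA_snd]; exact hkeep
          have h1 : (pvScanA (real'.zip banned') 1 (0, some v)).1 = 0 :=
            (pvScanA_shift (real'.zip banned') (some v) 1 1 0 0).2.2 h2
          refine ⟨v, h2, by omega, ?_, ?_⟩
          · rw [h1]; simp
          · rw [h1]
            simp [pvFrem, hb0]
        · -- a later element m > v wins
          have hne : (pvScanA (real'.zip banned') 1 (0, some v)).2 ≠ some v := by
            rw [pvScanA_snd, hm]; exact pvGt_ne hgt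
          obtain ⟨m', hm'2, hm'ge, hm'lt, hm'frem⟩ := ih banned' (some v) 0 hlen' ⟨m, hm, hgt⟩
          have hsh := pvScanA_shift (real'.zip banned') (some v) 1 0 0 0
          have heq2 : (pvScanA (real'.zip banned') 1 (0, some v)).2 =
              (pvScanA (real'.zip banned') 0 (0, some v)).2 := hsh.1
          obtain ⟨hge1, heq1⟩ := hsh.2.1 hne
          have hmm : m' = m := by rw [pvScanA_snd, hm] at hm'2; exact (Option.some.injEq _ _ ▸ hm'2.symm)
          refine ⟨m', heq2 ▸ hm'2, by omega, ?_, ?_⟩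
          · have : (pvScanA (real'.zip banned') 1 (0, some v)).1 =
                (pvScanA (real'.zip banned') 0 (0, some v)).1 + 1 := by omega
            rw [this]; simp; omega
          · have e1 : (pvScanA (real'.zip banned') 1 (0, some v)).1.toNat =
                (pvScanA (real'.zip banned') 0 (0, some v)).1.toNat + 1 := by omega
            rw [e1]
            have hvne : (v == m') ≠ true := by
              subst hmm; simp [pvGt] at hgt ⊢; omega
            simp [pvFrem, hb0, hvne]
            simpa [pvFrem] using hm'frem
      · -- no update at this column
        simp only [List.zip_cons_cons, pvScanA, if_neg hc, zero_add]
        have hbeat' : ∃ m, pvOmax mn (pvFrem (real'.zip banned')) = some m ∧ pvGt m mn = true := by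
          by_cases hb0 : b = 0
          · have hg : pvGt v mn ≠ true := fun h => hc ⟨hb0, h⟩
            obtain ⟨m, hm, hgt⟩ := hbeat
            refine ⟨m, ?_, hgt⟩
            simpa [pvFrem, pvOmax, hb0, hg] using hm
          · obtain ⟨m, hm, hgt⟩ := hbeat
            refine ⟨m, ?_, hgt⟩
            simpa [pvFrem, pvOmax, hb0] using hm
        obtain ⟨m', hm'2, hm'ge, hm'lt, hm'frem⟩ := ih banned' mn mc0 hlen' hbeat'
        have hgtm : pvGt m' mn = true := by
          obtain ⟨m, hm, hgt⟩ := hbeat'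
          rw [pvScanA_snd, hm] at hm'2
          injection hm'2 with h
          exact h ▸ hgt
        have hne : (pvScanA (real'.zip banned') 0 (mc0, mn)).2 ≠ mn := by
          rw [hm'2]; exact pvGt_ne hgtm
        have hsh := pvScanA_shift (real'.zip banned') mn 1 0 mc0 mc0
        have heq2 : (pvScanA (real'.zip banned') 1 (mc0, mn)).2 =
            (pvScanA (real'.zip banned') 0 (mc0, mn)).2 := hsh.1
        obtain ⟨hge1, heq1⟩ := hsh.2.1 (by rw [heq2]; exact hne)
        have e1 : (pvScanA (real'.zip banned') 1 (mc0, mn)).1.toNat =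
            (pvScanA (real'.zip banned') 0 (mc0, mn)).1.toNat + 1 := by omega
        refine ⟨m', by rw [heq2]; exact hm'2, by omega, ?_, ?_⟩
        · rw [e1]; simp; omega
        · rw [e1]
          by_cases hb0 : b = 0
          · have hg : pvGt v mn = false := by
              by_contra h
              exact hc ⟨hb0, by simpa using h⟩
            have hvne : (v == m') ≠ true := by
              cases mn with
              | none => simp [pvGt] at hg
              | some y => simp [pvGt] at hg hgtm ⊢; omega
            simp [pvFrem, hb0, hvne]
            simpa [pvFrem] using hm'frem
          · simp [pvFrem, hb0]
            simpa [pvFrem] using hm'frem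
def pvG : Nat → List Int → Int
  | 0, _ => 0
  | f + 1, l =>
      match l with
      | [] => 0
      | h :: t => let m := pvBestScan h t; m - pvG f (l.erase m)

theorem pvHelperA_eq_pvG : ∀ (f : Nat) (real banned : List Int),
    banned.length = real.length →
    (pvFrem (real.zip banned)).length = f →
    pvHelperA real f banned = pvG f (pvFrem (real.zip banned)) := by
  intro f
  induction f with
  | zero => intro real banned _ hf; rfl
  | succ f ih =>
    intro real banned hlen hf
    obtain ⟨h, t, hrem⟩ : ∃ h t, pvFrem (real.zip banned) = h :: t := by
      cases hr : pvFrem (real.zip banned) with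
      | nil => rw [hr] at hf; simp at hf
      | cons h t => exact ⟨h, t, rfl⟩
    have homax : pvOmax none (pvFrem (real.zip banned)) = some (pvBestScan h t) := by
      rw [hrem]
      show pvOmax (if pvGt h none then some h else none) t = _
      simp [pvGt, pvOmax_some_cons]
    obtain ⟨m', hs2, hsge, hslt, hsfrem⟩ :=
      pvScanA_step real banned none (-1) hlen ⟨_, homax, rfl⟩
    have hmm : m' = pvBestScan h t := by
      rw [pvScanA_snd, homax] at hs2; injection hs2 with hx; exact hx.symm
    subst hmm
    have hmem : pvBestScan h t ∈ pvFrem (real.zip banned) := by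
      rw [hrem]; exact pvBestScan_mem h t
    show (pvScanA (real.zip banned) 0 (-1, none)).2.getD 0 -
        pvHelperA real f (pvSetBanned banned (pvScanA (real.zip banned) 0 (-1, none)).1) = _
    have hset : pvSetBanned banned (pvScanA (real.zip banned) 0 (-1, none)).1 =
        banned.set (pvScanA (real.zip banned) 0 (-1, none)).1.toNat 1 := by
      unfold pvSetBanned
      rw [if_neg (by omega)]
    rw [hs2, hset]
    have hlen2 : (banned.set (pvScanA (real.zip banned) 0 (-1, none)).1.toNat 1).length
        = real.length := by simpa using hlen
    have hflen : (pvFrem (real.zip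
        (banned.set (pvScanA (real.zip banned) 0 (-1, none)).1.toNat 1))).length = f := by
      rw [hsfrem]
      have := List.length_erase_of_mem hmem
      omega
    rw [ih real _ hlen2 hflen, hsfrem, hrem]
    simp [pvG]

theorem pvSelB_eq_pvG : ∀ (f : Nat) (rem : List Int) (total sign : Int),
    rem.length = f → pvSelB f rem total sign = total + sign * pvG f rem := by
  intro f
  induction f with
  | zero =>
    intro rem total sign hlen
    simp [pvSelB, pvG]
  | succ f ih =>
    intro rem total sign hlen
    cases rem with
    | nil => simp at hlen
    | cons h t =>
      show pvSelB f ((PySem.List.remove? (h :: t) (pvBestScan h t)).getD (h :: t))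
          (total + sign * pvBestScan h t) (-sign) = _
      rw [PySem.List.remove?_eq_some_erase _ _ (pvBestScan_mem h t), Option.getD_some]
      have hlen2 : ((h :: t).erase (pvBestScan h t)).length = f := by
        rw [List.length_erase_of_mem (pvBestScan_mem h t)]
        simp at hlen ⊢; omega
      rw [ih _ _ _ hlen2]
      show _ = total + sign * pvG (f+1) (h :: t)
      simp only [pvG]
      ring

theorem pvColFold : ∀ (rs : List (List Int)) (a0 : Int) (c : Nat),
    rs.foldl (fun t row => pvPyMax (row.getD c 0) t) (some a0) =
      some (rs.foldl (fun a row => max a (row.getD c 0)) a0) := by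
  intro rs
  induction rs with
  | nil => intro a0 c; rfl
  | cons row rest ih =>
    intro a0 c
    have e : pvPyMax (row.getD c 0) (some a0) = some (max a0 (row.getD c 0)) := by
      simp only [pvPyMax]
      by_cases h : a0 > row.getD c 0
      · rw [if_pos h, max_eq_left (by omega)]
      · rw [if_neg h, max_eq_right (by omega)]
    rw [List.foldl_cons, e, ih, List.foldl_cons]

theorem pvFrem_zip_replicate : ∀ l : List Int,
    pvFrem (l.zip (List.replicate l.length 0)) = l := by
  intro l
  induction l with
  | nil => rfl
  | cons h t ih => simpa [pvFrem, List.replicate_succ] using ih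

theorem pv_main_eq : ∀ (moves : List (List Int)), moves ≠ [] →
    matrix_game_old moves = matrix_game_old_alt moves := by
  intro moves hne
  cases moves with
  | nil => exact absurd rfl hne
  | cons r0 rs =>
    have hcol : ∀ c : Nat,
        (((r0 :: rs)).foldl (fun t row => pvPyMax (row.getD c 0) t) none).getD 0 =
          (PySem.List.max? ((r0 :: rs).map (fun row => row.getD c 0)) (fun x => x)).getD 0 := by
      intro c
      rw [List.map_cons, PySem.List.max?_id_cons]
      show ((rs.foldl (fun t row => pvPyMax (row.getD c 0) t) (some (r0.getD c 0)))).getD 0 = _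
      rw [pvColFold rs (r0.getD c 0) c, List.foldl_map]
    have hM : (List.range r0.length).map (fun c =>
        (((r0 :: rs)).foldl (fun t row => pvPyMax (row.getD c 0) t) none).getD 0)
        = (List.range r0.length).map (fun c =>
        (PySem.List.max? ((r0 :: rs).map (fun row => row.getD c 0)) (fun x => x)).getD 0) :=
      List.map_congr_left (fun c _ => hcol c)
    show pvHelperA ((List.range r0.length).map (fun c =>
        (((r0 :: rs)).foldl (fun t row => pvPyMax (row.getD c 0) t) none).getD 0))
        r0.length (List.replicate r0.length 0)
      = pvSelB ((List.range r0.length).map (fun c =>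
          (PySem.List.max? ((r0 :: rs).map (fun row => row.getD c 0)) (fun x => x)).getD 0)).length
          ((List.range r0.length).map (fun c =>
          (PySem.List.max? ((r0 :: rs).map (fun row => row.getD c 0)) (fun x => x)).getD 0)) 0 1
    rw [← hM]
    set L := (List.range r0.length).map (fun c =>
        (((r0 :: rs)).foldl (fun t row => pvPyMax (row.getD c 0) t) none).getD 0) with hL
    rw [show r0.length = L.length from by rw [hL]; simp]
    rw [pvHelperA_eq_pvG _ _ _ (by simp) (by rw [pvFrem_zip_replicate]),
      pvFrem_zip_replicate, pvSelB_eq_pvG _ _ 0 1 rfl]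
    ring

-- ===== VERDICT (by name: the statement is the Claim_ definition above) =====
theorem matrix_game_old_spec : Claim_equal_matrix_game_old := by
  intro moves _ hpre
  exact pv_main_eq moves hpre.1
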